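-- pv_equiv track=rewrite | github.com/0x404/BIT-NLP-P1 | evaluator/wordSegment.py | getIntersectCount
-- ===== SOURCE A (Python) =====
-- def getIntersectCount(x, y):
--     counterX, counterY = {}, {}
--     for interval in x:
--         if interval not in counterX.keys():
--             counterX[interval] = 0
--         else:
--             counterX[interval] += 1
--     for interval in y:
--         if interval not in counterY.keys():
--             counterY[interval] = 0
--         else:
--             counterY[interval] += 1
--     ans = 0
--     for key in counterX.keys():
--         if key in counterY.keys():
--             ans += 1
--     return ans
-- ===== SOURCE B (Python) =====
-- def getIntersectCount(x, y):
--     xs = sorted(x)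
--     ys = sorted(y)
--     i, j, ans = 0, 0, 0
--     n, m = len(xs), len(ys)
--     while i < n and j < m:
--         if xs[i] < ys[j]:
--             i += 1
--         elif ys[j] < xs[i]:
--             j += 1
--         else:
--             ans += 1
--             v = xs[i]
--             while i < n and xs[i] == v:
--                 i += 1
--             while j < m and ys[j] == v:
--                 j += 1
--     return ans
-- ===== Notes on version B (the rewrite author's own statement) =====
-- stated objective: alternative
-- what changed: Replaces A's hash-based counting (two dict-building loops plus a key-membership counting loop) with a comparison-based sort-then-merge: both lists are sorted and a single two-pointer sweep counts each common value once, skipping duplicate runs; no dict or set is used.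
import Mathlib
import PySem

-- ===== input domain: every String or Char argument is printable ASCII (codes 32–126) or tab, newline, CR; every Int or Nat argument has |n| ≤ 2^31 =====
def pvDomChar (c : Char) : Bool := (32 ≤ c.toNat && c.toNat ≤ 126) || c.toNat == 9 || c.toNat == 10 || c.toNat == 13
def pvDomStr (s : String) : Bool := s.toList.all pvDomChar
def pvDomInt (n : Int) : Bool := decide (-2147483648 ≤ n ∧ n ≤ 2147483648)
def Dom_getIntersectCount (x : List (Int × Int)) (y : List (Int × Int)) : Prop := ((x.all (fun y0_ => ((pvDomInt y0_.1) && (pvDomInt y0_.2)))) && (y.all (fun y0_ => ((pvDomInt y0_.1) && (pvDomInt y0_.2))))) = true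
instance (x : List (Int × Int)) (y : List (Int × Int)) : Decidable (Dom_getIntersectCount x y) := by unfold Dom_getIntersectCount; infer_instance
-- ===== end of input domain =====

-- B replaces A's hash/dict counting with a comparison-based sort-then-two-pointer merge (alternative algorithm, not faster).

-- ===== PORT A =====
-- the body of both for-loops over x and y: first occurrence inserts 0, later ones increment
def pvCountStep (d : PySem.Dict (Int × Int) Int) (interval : Int × Int) : PySem.Dict (Int × Int) Int :=
  if d.contains interval = false then d.insert interval 0
  else d.modify interval 0 (· + 1)

def getIntersectCount (x : List (Int × Int)) (y : List (Int × Int)) : Int :=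
  let counterX := x.foldl pvCountStep PySem.Dict.empty
  let counterY := y.foldl pvCountStep PySem.Dict.empty
  counterX.keys.foldl (fun ans key => if counterY.contains key = true then ans + 1 else ans) 0

-- ===== PORT B =====
-- Python's '<' on int pairs: lexicographic (exactly the comparator of sorted2 with keys fst, snd)
def pvLexLt (a b : Int × Int) : Bool :=
  decide (a.1 < b.1) || (!decide (b.1 < a.1) && decide (a.2 < b.2))

-- Source B's two-pointer while loop over the two sorted lists; the inner 'while xs[i] == v' /
-- 'while ys[j] == v' skip loops are the two dropWhile calls (the matched heads a and b — both
-- equal to v — are the first elements each skip loop discards)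
def pvMerge : List (Int × Int) → List (Int × Int) → Int
  | [], _ => 0
  | _ :: _, [] => 0
  | a :: as, b :: bs =>
    if pvLexLt a b then pvMerge as (b :: bs)
    else if pvLexLt b a then pvMerge (a :: as) bs
    else 1 + pvMerge (List.dropWhile (· == a) as) (List.dropWhile (· == a) bs)
termination_by l1 l2 => l1.length + l2.length
decreasing_by
  · simp only [List.length_cons]; omega
  · simp only [List.length_cons]; omega
  · have h1 := List.length_dropWhile_le (· == a) as
    have h2 := List.length_dropWhile_le (· == a) bs
    simp only [List.length_cons]; omega

def getIntersectCount_alt (x : List (Int × Int)) (y : List (Int × Int)) : Int :=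
  pvMerge (PySem.List.sorted2 x Prod.fst Prod.snd false) (PySem.List.sorted2 y Prod.fst Prod.snd false)

-- ===== PRECONDITION & SPEC =====
def Spec_getIntersectCount (x : List (Int × Int)) (y : List (Int × Int)) (out : Int) : Prop := out = getIntersectCount_alt x y
instance (x : List (Int × Int)) (y : List (Int × Int)) (out : Int) : Decidable (Spec_getIntersectCount x y out) := by unfold Spec_getIntersectCount; infer_instance

-- ===== CLAIM (what is proved, stated in full; the proofs are below) =====
def Claim_equal_getIntersectCount : Prop := ∀ (x : List (Int × Int)) (y : List (Int × Int)), Dom_getIntersectCount x y → Spec_getIntersectCount x y (getIntersectCount x y)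

-- ===== LEMMAS AND PROOFS =====

-- order facts about the lexicographic comparator
theorem pvLexLt_asymm {a b : Int × Int} (h : pvLexLt a b = true) : pvLexLt b a = false := by
  rcases a with ⟨a1, a2⟩; rcases b with ⟨b1, b2⟩; simp [pvLexLt] at *; omega

theorem pvLexLt_lt_of_lt_of_le {a b c : Int × Int} (h1 : pvLexLt a b = true)
    (h2 : pvLexLt c b = false) : pvLexLt a c = true := by
  rcases a with ⟨a1, a2⟩; rcases b with ⟨b1, b2⟩; rcases c with ⟨c1, c2⟩; simp [pvLexLt] at *; omega

theorem pvLexLt_total {a b : Int × Int} (h1 : pvLexLt a b = false) (h2 : pvLexLt b a = false) :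
    a = b := by
  rcases a with ⟨a1, a2⟩; rcases b with ⟨b1, b2⟩; simp [pvLexLt, Prod.mk.injEq] at *; omega

theorem pvLexLt_irrefl (a : Int × Int) : pvLexLt a a = false := by
  rcases a with ⟨a1, a2⟩; simp [pvLexLt]

-- the ordering invariant produced by sorted2's insertion sort
def pvSorted (l : List (Int × Int)) : Prop := l.Pairwise (fun u v => pvLexLt v u = false)

theorem pvInsertBy_sorted (x : Int × Int) (ys : List (Int × Int)) (h : pvSorted ys) :
    pvSorted (PySem.List.insertBy pvLexLt x ys) := by
  induction ys with
  | nil => simp [PySem.List.insertBy, pvSorted]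
  | cons y t ih =>
      rcases h' : pvLexLt x y with _ | _
      · -- x not before y: result y :: insertBy x t
        simp only [PySem.List.insertBy, h', Bool.false_eq_true, if_false]
        have ht : pvSorted t := (List.pairwise_cons.mp h).2
        refine List.Pairwise.cons ?_ (ih ht)
        intro c hc
        rcases (PySem.List.mem_insertBy pvLexLt x c t).mp hc with rfl | hct
        · exact h'
        · exact (List.pairwise_cons.mp h).1 c hct
      · -- x before y: result x :: y :: t
        simp only [PySem.List.insertBy, h', if_true]
        refine List.Pairwise.cons ?_ h
        intro c hc
        rcases List.mem_cons.mp hc with rfl | hct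
        · exact pvLexLt_asymm h'
        · exact pvLexLt_asymm (pvLexLt_lt_of_lt_of_le h' ((List.pairwise_cons.mp h).1 c hct))

theorem pvSorted_sorted2 (xs : List (Int × Int)) :
    pvSorted (PySem.List.sorted2 xs Prod.fst Prod.snd false) := by
  have hgen : ∀ (l acc : List (Int × Int)), pvSorted acc →
      pvSorted (l.foldl (fun acc x => PySem.List.insertBy pvLexLt x acc) acc) := by
    intro l
    induction l with
    | nil => intro acc hacc; exact hacc
    | cons a t ih => intro acc hacc; exact ih _ (pvInsertBy_sorted a acc hacc)
  have h0 := hgen xs [] (by simp [pvSorted])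
  simpa [PySem.List.sorted2, pvLexLt] using h0

-- dropping the leading run of a's removes every a from a sorted list lying above a
theorem pvDropWhile_ne {a : Int × Int} {l : List (Int × Int)} (hs : pvSorted l)
    (ha : ∀ c ∈ l, pvLexLt c a = false) : ∀ c ∈ List.dropWhile (· == a) l, c ≠ a := by
  induction l with
  | nil => simp
  | cons c0 t ih =>
      rcases h0 : (c0 == a) with _ | _
      · simp only [List.dropWhile_cons, h0, Bool.false_eq_true, if_false]
        intro c hc
        have hc0a : c0 ≠ a := by simpa using h0
        rcases List.mem_cons.mp hc with rfl | hct
        · exact hc0a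
        · have hac0 : pvLexLt a c0 = true := by
            rcases h3 : pvLexLt a c0 with _ | _
            · exact absurd (pvLexLt_total h3 (ha c0 List.mem_cons_self)).symm hc0a
            · rfl
          have hcc0 := (List.pairwise_cons.mp hs).1 c hct
          intro heq
          rw [heq] at hcc0
          rw [hcc0] at hac0
          exact Bool.false_ne_true hac0
      · simp only [List.dropWhile_cons, h0, if_true]
        exact ih (List.pairwise_cons.mp hs).2 (fun c hc => ha c (List.mem_cons_of_mem _ hc))

-- dropping a leading run of a's changes no element set once a itself is inserted
theorem pvInsert_dropWhile (a : Int × Int) (l : List (Int × Int)) :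
    insert a l.toFinset = insert a (List.dropWhile (· == a) l).toFinset := by
  induction l with
  | nil => rfl
  | cons c t ih =>
      rcases h0 : (c == a) with _ | _
      · simp only [List.dropWhile_cons, h0, Bool.false_eq_true, if_false]
      · have hca : c = a := by simpa using h0
        subst hca
        simp only [List.dropWhile_cons, h0, if_true, List.toFinset_cons]
        rw [Finset.insert_comm, Finset.insert_idem]
        exact ih

-- the merge loop on two sorted lists counts the common distinct values
theorem pvMerge_card : ∀ (n : Nat) (l1 l2 : List (Int × Int)), l1.length + l2.length ≤ n →
    pvSorted l1 → pvSorted l2 →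
    pvMerge l1 l2 = ((l1.toFinset ∩ l2.toFinset).card : Int) := by
  intro n
  induction n with
  | zero =>
      intro l1 l2 hlen _ _
      have h1 : l1 = [] := by cases l1 <;> simp_all
      have h2 : l2 = [] := by cases l2 <;> simp_all
      subst h1; subst h2; simp [pvMerge]
  | succ n ih =>
      intro l1 l2 hlen hs1 hs2
      match l1, l2 with
      | [], l2 => simp [pvMerge]
      | a :: as, [] => simp [pvMerge]
      | a :: as, b :: bs =>
          rw [pvMerge]
          rcases hab : pvLexLt a b with _ | _
          · rcases hba : pvLexLt b a with _ | _
            · -- equal heads: count the value once, skip both runs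
              have heq : a = b := pvLexLt_total hab hba
              subst heq
              rw [if_neg Bool.false_ne_true, if_neg Bool.false_ne_true]
              have hsas : pvSorted as := (List.pairwise_cons.mp hs1).2
              have hsbs : pvSorted bs := (List.pairwise_cons.mp hs2).2
              have hsas' : pvSorted (List.dropWhile (· == a) as) :=
                List.Pairwise.sublist (List.dropWhile_sublist _) hsas
              have hsbs' : pvSorted (List.dropWhile (· == a) bs) :=
                List.Pairwise.sublist (List.dropWhile_sublist _) hsbs
              have hlen' : (List.dropWhile (· == a) as).length
                  + (List.dropWhile (· == a) bs).length ≤ n := by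
                have g1 := List.length_dropWhile_le (· == a) as
                have g2 := List.length_dropWhile_le (· == a) bs
                simp only [List.length_cons] at hlen; omega
              rw [ih _ _ hlen' hsas' hsbs']
              have hnas : a ∉ (List.dropWhile (· == a) as).toFinset := by
                simp only [List.mem_toFinset]
                intro hmem
                exact pvDropWhile_ne hsas (List.pairwise_cons.mp hs1).1 a hmem rfl
              have hnbs : a ∉ (List.dropWhile (· == a) bs).toFinset := by
                simp only [List.mem_toFinset]
                intro hmem
                exact pvDropWhile_ne hsbs (List.pairwise_cons.mp hs2).1 a hmem rfl
              rw [List.toFinset_cons, List.toFinset_cons, pvInsert_dropWhile a as,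
                pvInsert_dropWhile a bs, ← Finset.insert_inter_distrib,
                Finset.card_insert_of_notMem (by simp only [Finset.mem_inter]; intro h; exact absurd h.1 hnas)]
              push_cast; ring
            · -- b < a: skip b, which occurs in neither intersection side
              rw [if_neg Bool.false_ne_true, if_pos rfl]
              have hsbs : pvSorted bs := (List.pairwise_cons.mp hs2).2
              rw [ih (a :: as) bs (by simp only [List.length_cons] at hlen ⊢; omega) hs1 hsbs]
              have hb : b ∉ (a :: as).toFinset := by
                simp only [List.mem_toFinset, List.mem_cons]
                rintro (rfl | hmem)
                · rw [pvLexLt_irrefl] at hba; exact Bool.false_ne_true hba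
                · have hc := (List.pairwise_cons.mp hs1).1 b hmem
                  rw [hc] at hba; exact Bool.false_ne_true hba
              rw [List.toFinset_cons (l := bs), Finset.inter_insert_of_notMem hb]
          · -- a < b: skip a
            rw [if_pos rfl]
            have hsas : pvSorted as := (List.pairwise_cons.mp hs1).2
            rw [ih as (b :: bs) (by simp only [List.length_cons] at hlen ⊢; omega) hsas hs2]
            have ha' : a ∉ (b :: bs).toFinset := by
              simp only [List.mem_toFinset, List.mem_cons]
              rintro (rfl | hmem)
              · rw [pvLexLt_irrefl] at hab; exact Bool.false_ne_true hab
              · have hc := (List.pairwise_cons.mp hs2).1 a hmem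
                rw [hc] at hab; exact Bool.false_ne_true hab
            rw [List.toFinset_cons (l := as), Finset.insert_inter_of_notMem ha']

-- one step of A's counting loop only adds the key to the key set
theorem pvCountStep_keys (d : PySem.Dict (Int × Int) Int) (k : Int × Int) :
    (pvCountStep d k).keys = PySem.Set.add d.keys k := by
  unfold pvCountStep
  rcases h : d.contains k with _ | _
  · simp [h, PySem.Dict.keys_insert_of_not_contains d 0 h, PySem.Set.add, PySem.Set.contains,
      ← PySem.Dict.contains_iff_mem_keys, h]
  · simp [h, PySem.Dict.keys_modify, PySem.Dict.keys_insert_of_contains _ _ h,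
      PySem.Set.add, PySem.Set.contains, ← PySem.Dict.contains_iff_mem_keys, h]

-- A's counting loop builds a dict whose key list is the ordered set of elements
theorem pvCountLoop_keys (l : List (Int × Int)) (d : PySem.Dict (Int × Int) Int) :
    (l.foldl pvCountStep d).keys = PySem.Set.update d.keys l := by
  induction l generalizing d with
  | nil => rfl
  | cons k t ih =>
      simp only [List.foldl_cons, ih, pvCountStep_keys, PySem.Set.update]

-- A computes the size of the intersection of the two element sets
theorem pvA_eq_set (x y : List (Int × Int)) :
    getIntersectCount x y
      = PySem.Set.len (PySem.Set.inter (PySem.Set.ofList x) (PySem.Set.ofList y)) := by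
  unfold getIntersectCount
  have hx : (x.foldl pvCountStep PySem.Dict.empty).keys = PySem.Set.ofList x :=
    pvCountLoop_keys x PySem.Dict.empty
  have hy : (y.foldl pvCountStep PySem.Dict.empty).keys = PySem.Set.ofList y :=
    pvCountLoop_keys y PySem.Dict.empty
  rw [PySem.List.foldl_count_if, hx]
  simp only [PySem.Set.len, PySem.Set.inter, List.countP_eq_length_filter, zero_add,
    Int.natCast_inj]
  congr 1
  apply List.filter_congr
  intro k _
  rw [PySem.Dict.contains_eq_decide_mem_keys, hy]
  simp [PySem.Set.contains]

-- the Set-sized intersection is the Finset-sized one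
theorem pvSetInter_card (x y : List (Int × Int)) :
    PySem.Set.len (PySem.Set.inter (PySem.Set.ofList x) (PySem.Set.ofList y))
      = ((x.toFinset ∩ y.toFinset).card : Int) := by
  simp only [PySem.Set.len, PySem.Set.inter, Int.natCast_inj]
  have h1 : List.filter (fun v => (PySem.Set.ofList y).contains v) (PySem.Set.ofList x)
      = List.filter (fun v => decide (v ∈ y.toFinset)) (PySem.Set.ofList x) := by
    apply List.filter_congr
    intro v _
    simp [PySem.Set.contains, PySem.Set.mem_ofList, List.mem_toFinset]
  rw [h1]
  have hnd : (List.filter (fun v => decide (v ∈ y.toFinset)) (PySem.Set.ofList x)).Nodup :=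
    (PySem.Set.nodup_ofList x).filter _
  rw [← List.toFinset_card_of_nodup hnd, List.toFinset_filter]
  have h2 : (PySem.Set.ofList x).toFinset = x.toFinset := by
    apply Finset.ext; intro v; simp [List.mem_toFinset, PySem.Set.mem_ofList]
  rw [h2]
  congr 1
  rw [← Finset.filter_mem_eq_inter]
  simp

theorem getIntersectCount_eq (x y : List (Int × Int)) :
    getIntersectCount x y = getIntersectCount_alt x y := by
  rw [pvA_eq_set, pvSetInter_card]
  unfold getIntersectCount_alt
  set sx := PySem.List.sorted2 x Prod.fst Prod.snd false with hsx
  set sy := PySem.List.sorted2 y Prod.fst Prod.snd false with hsy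
  have hpx : sx.Perm x := PySem.List.sorted2_perm x Prod.fst Prod.snd false
  have hpy : sy.Perm y := PySem.List.sorted2_perm y Prod.fst Prod.snd false
  rw [pvMerge_card (sx.length + sy.length) sx sy le_rfl (pvSorted_sorted2 x) (pvSorted_sorted2 y),
    List.toFinset_eq_of_perm _ _ hpx, List.toFinset_eq_of_perm _ _ hpy]

-- ===== VERDICT (by name: the statement is the Claim_ definition above) =====
theorem getIntersectCount_spec : Claim_equal_getIntersectCount := by
  intro x y _
  exact getIntersectCount_eq x y
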